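-- pv_equiv track=rewrite | github.com/lekesiz/netz-ai-assistant | backend/enhanced_google_drive_trainer.py | _get_file_priority
-- ===== SOURCE A (Python) =====
-- def _get_file_priority(filename: str) -> int:
--     """Get priority score for file (1-5, 5 being highest)"""
--     filename_lower = filename.lower()
--
--     if any(term in filename_lower for term in ['tarif', 'prix', 'pricing']):
--         return 5
--     elif any(term in filename_lower for term in ['guide', 'manuel', 'documentation']):
--         return 4
--     elif any(term in filename_lower for term in ['formation', 'training']):
--         return 4
--     elif any(term in filename_lower for term in ['service', 'procedure']):
--         return 3
--     else:
--         return 2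
-- ===== SOURCE B (Python) =====
-- _KEYWORD_SCORES = {
--     'tarif': 5, 'prix': 5, 'pricing': 5,
--     'guide': 4, 'manuel': 4, 'documentation': 4,
--     'formation': 4, 'training': 4,
--     'service': 3, 'procedure': 3,
-- }
--
-- def _get_file_priority(filename: str) -> int:
--     """Get priority score for file (1-5, 5 being highest)"""
--     low = filename.lower()
--     return max((score for kw, score in _KEYWORD_SCORES.items() if kw in low),
--                default=2)
-- ===== Notes on version B (the rewrite author's own statement) =====
-- stated objective: simpler
-- what changed: Replaces the ordered if/elif cascade of any()-scans with one keyword->score table and a single max-over-matching-keywords with default 2; valid because tier scores are non-increasing in cascade order and above the default.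
import Mathlib
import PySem

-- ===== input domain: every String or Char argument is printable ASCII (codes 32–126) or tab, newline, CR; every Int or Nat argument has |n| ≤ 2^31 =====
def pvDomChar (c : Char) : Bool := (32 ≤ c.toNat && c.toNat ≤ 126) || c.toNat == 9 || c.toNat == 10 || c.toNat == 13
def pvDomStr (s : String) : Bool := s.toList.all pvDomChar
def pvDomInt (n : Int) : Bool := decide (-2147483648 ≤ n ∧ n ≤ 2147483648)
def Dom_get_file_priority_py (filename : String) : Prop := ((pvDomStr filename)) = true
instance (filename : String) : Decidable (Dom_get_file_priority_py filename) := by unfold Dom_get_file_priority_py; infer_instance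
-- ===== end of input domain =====

-- B replaces A's ordered if/elif cascade with one keyword->score table and a max over all matching keywords (default 2): simpler, same cost.

-- ===== PORT A =====
def get_file_priority_py (filename : String) : Int :=
  let filename_lower := PySem.Str.lower filename
  if ["tarif", "prix", "pricing"].any (fun term => PySem.Str.isIn term filename_lower) then 5
  else if ["guide", "manuel", "documentation"].any (fun term => PySem.Str.isIn term filename_lower) then 4
  else if ["formation", "training"].any (fun term => PySem.Str.isIn term filename_lower) then 4
  else if ["service", "procedure"].any (fun term => PySem.Str.isIn term filename_lower) then 3
  else 2

-- ===== PORT B =====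
def pvKeywordScores : List (String × Int) :=
  [("tarif", 5), ("prix", 5), ("pricing", 5),
   ("guide", 4), ("manuel", 4), ("documentation", 4),
   ("formation", 4), ("training", 4),
   ("service", 3), ("procedure", 3)]

-- max(gen, default=2) is ported as (max? … id).getD 2
def get_file_priority_py_alt (filename : String) : Int :=
  let low := PySem.Str.lower filename
  (PySem.List.max? ((pvKeywordScores.filter (fun p => PySem.Str.isIn p.1 low)).map Prod.snd) (fun x => x)).getD 2

-- ===== PRECONDITION & SPEC =====
def Spec_get_file_priority_py (filename : String) (out : Int) : Prop := out = get_file_priority_py_alt filename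
instance (filename : String) (out : Int) : Decidable (Spec_get_file_priority_py filename out) := by unfold Spec_get_file_priority_py; infer_instance

-- ===== CLAIM (what is proved, stated in full; the proofs are below) =====
def Claim_equal_get_file_priority_py : Prop := ∀ (filename : String), Dom_get_file_priority_py filename → Spec_get_file_priority_py filename (get_file_priority_py filename)

-- ===== LEMMAS AND PROOFS =====
-- Both ports, after unfolding the literal keyword lists, are functions of the ten
-- Booleans "keyword k is a substring of the lowered filename"; pvA/pvB capture
-- those two functions definitionally and pvKey checks all 1024 valuations.
def pvA (b1 b2 b3 b4 b5 b6 b7 b8 b9 b10 : Bool) : Int :=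
  if b1 || (b2 || (b3 || false)) then 5
  else if b4 || (b5 || (b6 || false)) then 4
  else if b7 || (b8 || false) then 4
  else if b9 || (b10 || false) then 3
  else 2

def pvB (b1 b2 b3 b4 b5 b6 b7 b8 b9 b10 : Bool) : Int :=
  let l10 := cond b10 [("procedure", (3 : Int))] []
  let l9 := cond b9 (("service", 3) :: l10) l10
  let l8 := cond b8 (("training", 4) :: l9) l9
  let l7 := cond b7 (("formation", 4) :: l8) l8
  let l6 := cond b6 (("documentation", 4) :: l7) l7
  let l5 := cond b5 (("manuel", 4) :: l6) l6
  let l4 := cond b4 (("guide", 4) :: l5) l5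
  let l3 := cond b3 (("pricing", 5) :: l4) l4
  let l2 := cond b2 (("prix", 5) :: l3) l3
  let l1 := cond b1 (("tarif", 5) :: l2) l2
  (PySem.List.max? (l1.map Prod.snd) (fun x => x)).getD 2

theorem pvKey : ∀ b1 b2 b3 b4 b5 b6 b7 b8 b9 b10 : Bool,
    pvA b1 b2 b3 b4 b5 b6 b7 b8 b9 b10 = pvB b1 b2 b3 b4 b5 b6 b7 b8 b9 b10 := by decide

-- ===== VERDICT (by name: the statement is the Claim_ definition above) =====
theorem get_file_priority_py_spec : Claim_equal_get_file_priority_py := by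
  intro f _
  exact pvKey (PySem.Str.isIn "tarif" (PySem.Str.lower f)) (PySem.Str.isIn "prix" (PySem.Str.lower f))
    (PySem.Str.isIn "pricing" (PySem.Str.lower f)) (PySem.Str.isIn "guide" (PySem.Str.lower f))
    (PySem.Str.isIn "manuel" (PySem.Str.lower f)) (PySem.Str.isIn "documentation" (PySem.Str.lower f))
    (PySem.Str.isIn "formation" (PySem.Str.lower f)) (PySem.Str.isIn "training" (PySem.Str.lower f))
    (PySem.Str.isIn "service" (PySem.Str.lower f)) (PySem.Str.isIn "procedure" (PySem.Str.lower f))
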